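-- pv_equiv track=rewrite | github.com/NickIT87/IAMM_proceedings | Linguistic_representation_of_deterministic_graphs/AlgorithmsLibraries/alglib_version_02_current.py | find_neighbors_with_the_same_labels
-- ===== SOURCE A (Python) =====
-- from typing import Tuple, List, Union, Dict
--
-- def find_neighbors_with_the_same_labels(neighbors: List[int],
--                                         labels: List[str]
--                                         ) -> Dict[str, List[int]]:
--     """Helper for the AR reduction algorithm."""
--     element_positions: Dict[str, List[int]] = {}
--     for index, element in enumerate(labels):
--         element_positions.setdefault(element, []).append(neighbors[index])
--     equal_elements: Dict[str, List[int]] = {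
--         element: positions for element,
--         positions in element_positions.items() if len(positions) > 1
--     }
--     return equal_elements
-- ===== SOURCE B (Python) =====
-- def find_neighbors_with_the_same_labels(neighbors, labels):
--     """Helper for the AR reduction algorithm."""
--     result = {}
--     for i, element in enumerate(labels):
--         # first occurrence of a label that occurs again later: build its whole group at once
--         if labels.index(element) == i and element in labels[i + 1:]:
--             result[element] = [neighbors[j] for j, lab in enumerate(labels) if lab == element]
--     return result
-- ===== Notes on version B (the rewrite author's own statement) =====
-- stated objective: alternative
-- what changed: B drops the grouping dictionary entirely: for each first occurrence of a label it decides duplication by searching the remainder of the list and rebuilds that label's whole group with a nested scan, instead of A's one-pass hash grouping followed by discarding singleton groups.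
import Mathlib
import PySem

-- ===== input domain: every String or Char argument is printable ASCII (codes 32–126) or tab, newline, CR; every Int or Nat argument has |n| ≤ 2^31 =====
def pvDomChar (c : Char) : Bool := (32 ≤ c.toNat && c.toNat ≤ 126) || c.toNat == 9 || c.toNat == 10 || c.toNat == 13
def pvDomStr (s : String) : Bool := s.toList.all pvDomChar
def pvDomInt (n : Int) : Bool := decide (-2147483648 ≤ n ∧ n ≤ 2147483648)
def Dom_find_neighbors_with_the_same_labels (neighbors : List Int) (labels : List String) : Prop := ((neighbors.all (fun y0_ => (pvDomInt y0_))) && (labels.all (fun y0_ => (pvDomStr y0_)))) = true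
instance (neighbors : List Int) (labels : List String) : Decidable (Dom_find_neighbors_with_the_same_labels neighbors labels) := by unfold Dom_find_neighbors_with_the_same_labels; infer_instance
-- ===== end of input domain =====

-- B abandons the grouping dictionary: for each first occurrence of a label it searches the rest of the
-- list for a duplicate and rebuilds that label's whole group by a nested scan (alternative algorithm, O(n^2)).


-- ===== PORT A =====
-- setdefault(element, []).append(v) ≡ d[element] = d.get(element, []) + [v] ≡ Dict.modify element [] (· ++ [v]).
-- neighbors[index] is PySem.List.pyGet?; under Pre_ the index is always in range, so '.getD 0' is never the
-- default there (outside Pre_ Python raises IndexError, which Pre_ excludes).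
def find_neighbors_with_the_same_labels (neighbors : List Int) (labels : List String) : List (String × List Int) :=
  let element_positions : PySem.Dict String (List Int) :=
    (PySem.List.enumerate labels).foldl
      (fun d p => d.modify p.2 [] (fun xs => xs ++ [(PySem.List.pyGet? neighbors p.1).getD 0]))
      PySem.Dict.empty
  (element_positions.items.filter (fun p => decide (1 < p.2.length)))

-- ===== PORT B =====
-- labels.index(element) is PySem.List.index? (never none here since element ∈ labels);
-- labels[i+1:] is PySem.List.slice; the comprehension is filter-then-map over enumerate(labels).
def find_neighbors_with_the_same_labels_alt (neighbors : List Int) (labels : List String) : List (String × List Int) :=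
  ((PySem.List.enumerate labels).foldl
    (fun r p =>
      if ((PySem.List.index? labels p.2).map Int.ofNat == some p.1)
          && (PySem.List.slice labels (some (p.1 + 1)) none).contains p.2 then
        r.insert p.2
          (((PySem.List.enumerate labels).filter (fun q => q.2 == p.2)).map
            (fun q => (PySem.List.pyGet? neighbors q.1).getD 0))
      else r)
    (PySem.Dict.empty : PySem.Dict String (List Int))).items

-- ===== PRECONDITION & SPEC =====
-- A raises IndexError whenever labels is longer than neighbors; exactly those inputs are excluded.
def Pre_find_neighbors_with_the_same_labels (neighbors : List Int) (labels : List String) : Prop :=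
  labels.length ≤ neighbors.length
instance (neighbors : List Int) (labels : List String) : Decidable (Pre_find_neighbors_with_the_same_labels neighbors labels) := by unfold Pre_find_neighbors_with_the_same_labels; infer_instance

def pvWitness_find_neighbors_with_the_same_labels : List Int × List String := ([1, 2, 3], ["a", "b", "a"])

def Spec_find_neighbors_with_the_same_labels (neighbors : List Int) (labels : List String) (out : List (String × List Int)) : Prop := out = find_neighbors_with_the_same_labels_alt neighbors labels
instance (neighbors : List Int) (labels : List String) (out : List (String × List Int)) : Decidable (Spec_find_neighbors_with_the_same_labels neighbors labels out) := by unfold Spec_find_neighbors_with_the_same_labels; infer_instance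

-- ===== CLAIM (what is proved, stated in full; the proofs are below) =====
def Claim_equal_find_neighbors_with_the_same_labels : Prop := ∀ (neighbors : List Int) (labels : List String), Dom_find_neighbors_with_the_same_labels neighbors labels → Pre_find_neighbors_with_the_same_labels neighbors labels → Spec_find_neighbors_with_the_same_labels neighbors labels (find_neighbors_with_the_same_labels neighbors labels)

-- ===== LEMMAS AND PROOFS =====

-- ---- A side: the grouped dict's items, in canonical form ----
theorem grp_keys (pairs : List (String × Int)) :
    (pairs.foldl (fun d p => d.modify p.1 [] (fun xs => xs ++ [p.2])) (PySem.Dict.empty : PySem.Dict String (List Int))).keys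
     = PySem.Set.ofList (pairs.map Prod.fst) := by
  rw [PySem.Dict.keys_foldl_modify_key]
  simp [PySem.Set.update, PySem.Set.ofList_eq_foldl]

theorem grp_nodup (pairs : List (String × Int)) :
    (pairs.foldl (fun d p => d.modify p.1 [] (fun xs => xs ++ [p.2])) (PySem.Dict.empty : PySem.Dict String (List Int))).keys.Nodup := by
  apply PySem.Dict.nodup_keys_foldl_modify_key
  simp

theorem grp_items (pairs : List (String × Int)) :
    (pairs.foldl (fun d p => d.modify p.1 [] (fun xs => xs ++ [p.2])) (PySem.Dict.empty : PySem.Dict String (List Int))).items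
     = (PySem.Set.ofList (pairs.map Prod.fst)).map
        (fun k => (k, (pairs.filter (fun p => p.1 == k)).map (·.2))) := by
  rw [PySem.Dict.items_eq_map_keys _ (grp_nodup pairs) [], grp_keys]
  apply List.map_congr_left
  intro k _
  rw [PySem.Dict.getD_foldl_modify_append]
  simp

theorem grp_val_len (pairs : List (String × Int)) (k : String) :
    ((pairs.filter (fun p => p.1 == k)).map (·.2)).length = (pairs.map Prod.fst).count k := by
  rw [List.length_map, List.count, ← List.countP_eq_length_filter, List.countP_map]; rfl

theorem enum_map_zip (neighbors : List Int) (labels : List String) (h : labels.length ≤ neighbors.length) :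
    (PySem.List.enumerate labels).map (fun p => (p.2, (PySem.List.pyGet? neighbors p.1).getD 0)) = labels.zip neighbors := by
  apply List.ext_getElem
  · simp [PySem.List.length_enumerate]; omega
  · intro k h1 h2
    have hk : k < neighbors.length := by
      simp [PySem.List.length_enumerate] at h1; omega
    simp [PySem.List.getElem_enumerate, List.getElem?_eq_getElem hk]

-- A's result in canonical form: duplicated labels in first-occurrence order, each with its group
theorem a_canonical (neighbors : List Int) (labels : List String) (h : labels.length ≤ neighbors.length) :
    ((PySem.List.enumerate labels).foldl
      (fun d p => d.modify p.2 [] (fun xs => xs ++ [(PySem.List.pyGet? neighbors p.1).getD 0]))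
      (PySem.Dict.empty : PySem.Dict String (List Int))).items.filter (fun p => decide (1 < p.2.length))
    = ((PySem.Set.ofList labels).filter (fun l => decide (1 < labels.count l))).map
        (fun k => (k, ((labels.zip neighbors).filter (fun p => p.1 == k)).map (·.2))) := by
  set pairs := labels.zip neighbors with hpairs
  set P : String → Bool := fun l => decide (1 < labels.count l) with hP
  have hA : (PySem.List.enumerate labels).foldl
      (fun d p => d.modify p.2 [] (fun xs => xs ++ [(PySem.List.pyGet? neighbors p.1).getD 0]))
      (PySem.Dict.empty : PySem.Dict String (List Int))
      = pairs.foldl (fun d p => d.modify p.1 [] (fun xs => xs ++ [p.2])) PySem.Dict.empty := by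
    rw [hpairs, ← enum_map_zip neighbors labels h, List.foldl_map]
  rw [hA, grp_items, List.filter_map]
  have hL : pairs.map Prod.fst = labels := List.map_fst_zip h
  have hpred : ((fun p : String × List Int => decide (1 < p.2.length)) ∘
      (fun k => (k, (pairs.filter (fun p => p.1 == k)).map (·.2)))) = P := by
    funext k
    simp only [Function.comp_apply, grp_val_len, hL, hP]
  rw [hpred, hL]

-- ---- B side ----

-- a fold of fresh-key inserts appends its items in iteration order
theorem items_foldl_insert_fresh (E : List (Int × String)) (f : Int × String → List Int)
    (d : PySem.Dict String (List Int)) (hd : d.keys.Nodup)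
    (hfresh : ∀ p ∈ E, p.2 ∉ d.keys) (hnd : (E.map (·.2)).Nodup) :
    (E.foldl (fun r p => r.insert p.2 (f p)) d).items
      = d.items ++ E.map (fun p => (p.2, f p)) := by
  induction E generalizing d with
  | nil => simp
  | cons x t ih =>
    have hxc : d.contains x.2 = false := by
      rw [PySem.Dict.contains_eq_decide_mem_keys]
      simp [hfresh x (by simp)]
    have h1 : (d.insert x.2 (f x)).items = d.items ++ [(x.2, f x)] :=
      PySem.Dict.items_insert_of_not_contains d (f x) hxc
    have hk : (d.insert x.2 (f x)).keys = d.keys ++ [x.2] :=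
      PySem.Dict.keys_insert_of_not_contains d (f x) hxc
    simp only [List.map_cons, List.nodup_cons] at hnd
    rw [List.foldl_cons, ih (d := d.insert x.2 (f x))]
    · simp [h1]
    · exact PySem.Dict.nodup_keys_insert d _ _ hd
    · intro p hp
      rw [hk]
      simp only [List.mem_append, List.mem_singleton]
      push Not
      refine ⟨hfresh p (by simp [hp]), ?_⟩
      intro hpe
      exact hnd.1 (hpe ▸ (List.mem_map.mpr ⟨p, hp, rfl⟩))
    · exact hnd.2

-- first occurrences, in order, are exactly set(labels)
theorem firstOcc (labels : List String) :
    ((PySem.List.enumerate labels).filter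
        (fun p => (PySem.List.index? labels p.2).map Int.ofNat == some p.1)).map (·.2)
      = PySem.Set.ofList labels := by
  induction labels using List.reverseRecOn with
  | nil => simp [PySem.List.enumerate]
  | append_singleton l x ih =>
    rw [PySem.List.enumerate_append]
    rw [List.filter_append, List.map_append]
    have hmem : ∀ p ∈ PySem.List.enumerate l, p.2 ∈ l := by
      intro p hp
      rcases (PySem.List.mem_enumerate_iff _ _ _).mp hp with ⟨k, hk, rfl⟩
      exact List.getElem_mem _
    have hcong : (PySem.List.enumerate l).filter
        (fun p => (PySem.List.index? (l ++ [x]) p.2).map Int.ofNat == some p.1)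
        = (PySem.List.enumerate l).filter
        (fun p => (PySem.List.index? l p.2).map Int.ofNat == some p.1) := by
      apply List.filter_congr
      intro p hp
      rw [PySem.List.index?_append_of_mem _ (hmem p hp)]
    rw [hcong, ih]
    by_cases hx : x ∈ l
    · -- x occurs earlier: its index is < l.length, the last entry is filtered out
      have hidx : ∃ k, PySem.List.index? l x = some k ∧ k < l.length := by
        rcases Option.isSome_iff_exists.mp ((PySem.List.index?_isSome_iff _ _).mpr hx) with ⟨k, hk⟩
        rcases PySem.List.getElem_of_index?_eq_some hk with ⟨hlt, _, _⟩
        exact ⟨k, hk, hlt⟩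
      rcases hidx with ⟨k, hk, hklt⟩
      have : ((PySem.List.index? (l ++ [x]) x).map Int.ofNat == some ((0 : Int) + l.length)) = false := by
        rw [PySem.List.index?_append_of_mem _ hx, hk]
        simp only [Int.ofNat_eq_natCast, Option.map_some, beq_eq_false_iff_ne, ne_eq, Option.some.injEq]
        omega
      simp only [PySem.List.enumerate, List.filter_cons, List.filter_nil]
      simp only [this]
      rw [PySem.Set.ofList_append_singleton]
      simp [PySem.Set.add, PySem.Set.contains, PySem.Set.mem_ofList, hx]
    · have : ((PySem.List.index? (l ++ [x]) x).map Int.ofNat == some ((0 : Int) + l.length)) = true := by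
        rw [PySem.List.index?_append_singleton_self l x hx]
        simp [Int.ofNat_eq_natCast]
      simp only [PySem.List.enumerate, List.filter_cons, List.filter_nil]
      simp only [this]
      rw [PySem.Set.ofList_append_singleton]
      simp [PySem.Set.add, PySem.Set.contains, PySem.Set.mem_ofList, hx]

-- at a first occurrence, "seen again later" means "occurs more than once"
theorem later_iff_count (labels : List String) (p : Int × String)
    (hp : p ∈ PySem.List.enumerate labels)
    (h1 : ((PySem.List.index? labels p.2).map Int.ofNat == some p.1) = true) :
    ((PySem.List.slice labels (some (p.1 + 1)) none).contains p.2)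
      = decide (1 < labels.count p.2) := by
  rcases (PySem.List.mem_enumerate_iff _ _ _).mp hp with ⟨k, hk, rfl⟩
  simp only at h1 ⊢
  have hidx : PySem.List.index? labels labels[k] = some k := by
    rcases Option.isSome_iff_exists.mp
      ((PySem.List.index?_isSome_iff _ _).mpr (List.getElem_mem hk)) with ⟨j, hj⟩
    rw [hj]
    have := beq_iff_eq.mp h1
    rw [hj] at this
    simp only [Int.ofNat_eq_natCast, Option.map_some, Option.some.injEq] at this
    congr 1
    omega
  rcases PySem.List.getElem_of_index?_eq_some hidx with ⟨_, _, hfirst⟩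
  have hsl : PySem.List.slice labels (some ((0 : Int) + (k : Int) + 1)) none = labels.drop (k + 1) := by
    have : (0 : Int) + (k : Int) + 1 = ((k + 1 : Nat) : Int) := by push_cast; ring
    rw [this, PySem.List.slice_from_natCast]
  rw [hsl]
  obtain ⟨v, hv⟩ : ∃ v, labels[k] = v := ⟨_, rfl⟩
  rw [hv]
  rw [hv] at hfirst
  have hsplit : labels = labels.take k ++ v :: labels.drop (k + 1) := by
    conv_lhs => rw [← List.take_append_drop k labels]
    congr 1
    rw [List.drop_eq_getElem_cons hk, hv]
  have hct : (labels.take k).count v = 0 := by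
    rw [List.count_eq_zero]
    intro hmem
    rcases List.mem_take_iff_getElem.mp hmem with ⟨j, hj, hje⟩
    exact hfirst j (by omega) hje
  have hcount : labels.count v = 1 + (labels.drop (k + 1)).count v := by
    conv_lhs => rw [hsplit]
    rw [List.count_append, List.count_cons_self, hct]
    ring
  by_cases hmem : v ∈ labels.drop (k + 1)
  · have hpos : 0 < (labels.drop (k + 1)).count v := List.count_pos_iff.mpr hmem
    simp [hmem, hcount]
  · have hz : (labels.drop (k + 1)).count v = 0 := List.count_eq_zero.mpr hmem
    simp [hmem, hcount, hz]

-- B's result in the same canonical form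
theorem b_canonical (neighbors : List Int) (labels : List String) (h : labels.length ≤ neighbors.length) :
    find_neighbors_with_the_same_labels_alt neighbors labels
    = ((PySem.Set.ofList labels).filter (fun l => decide (1 < labels.count l))).map
        (fun k => (k, ((labels.zip neighbors).filter (fun p => p.1 == k)).map (·.2))) := by
  unfold find_neighbors_with_the_same_labels_alt
  rw [PySem.List.foldl_ite_eq_foldl_filter]
  have hc : (PySem.List.enumerate labels).filter
        (fun p => decide ((((PySem.List.index? labels p.2).map Int.ofNat == some p.1)
            && (PySem.List.slice labels (some (p.1 + 1)) none).contains p.2) = true))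
      = ((PySem.List.enumerate labels).filter
          (fun p => (PySem.List.index? labels p.2).map Int.ofNat == some p.1)).filter
          (fun p => decide (1 < labels.count p.2)) := by
    rw [List.filter_filter]
    apply List.filter_congr
    intro p hp
    simp only [Bool.decide_eq_true]
    rcases Bool.eq_false_or_eq_true
        ((PySem.List.index? labels p.2).map Int.ofNat == some p.1) with h1 | h1
    · rw [later_iff_count labels p hp h1, h1]
      simp [Bool.and_comm]
    · rw [h1]
      simp
  rw [hc]
  have hEmap : (((PySem.List.enumerate labels).filter
          (fun p => (PySem.List.index? labels p.2).map Int.ofNat == some p.1)).filter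
          (fun p => decide (1 < labels.count p.2))).map (·.2)
      = ((PySem.Set.ofList labels).filter (fun l => decide (1 < labels.count l))) := by
    have hcomp : (fun p : Int × String => decide (1 < labels.count p.2))
        = ((fun l => decide (1 < labels.count l)) ∘ (·.2)) := rfl
    rw [hcomp, ← List.filter_map, firstOcc]
  have hnodup : ((((PySem.List.enumerate labels).filter
          (fun p => (PySem.List.index? labels p.2).map Int.ofNat == some p.1)).filter
          (fun p => decide (1 < labels.count p.2))).map (·.2)).Nodup := by
    rw [hEmap]
    exact (PySem.Set.nodup_ofList labels).filter _
  rw [items_foldl_insert_fresh _ _ PySem.Dict.empty (by simp) (by simp) hnodup]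
  have hemp : (PySem.Dict.empty : PySem.Dict String (List Int)).items = [] := rfl
  rw [hemp]
  simp only [List.nil_append]
  rw [show (fun p : Int × String => (p.2,
        ((PySem.List.enumerate labels).filter (fun q => q.2 == p.2)).map
          (fun q => (PySem.List.pyGet? neighbors q.1).getD 0)))
      = ((fun k : String => (k,
        ((PySem.List.enumerate labels).filter (fun q => q.2 == k)).map
          (fun q => (PySem.List.pyGet? neighbors q.1).getD 0))) ∘ (·.2)) from rfl,
    ← List.map_map, hEmap]
  apply List.map_congr_left
  intro k _
  have hval : ((PySem.List.enumerate labels).filter (fun q => q.2 == k)).map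
        (fun q => (PySem.List.pyGet? neighbors q.1).getD 0)
      = ((labels.zip neighbors).filter (fun p => p.1 == k)).map (·.2) := by
    rw [← enum_map_zip neighbors labels h, List.filter_map, List.map_map]
    rfl
  rw [hval]

-- ===== VERDICT (by name: the statement is the Claim_ definition above) =====
theorem find_neighbors_with_the_same_labels_spec : Claim_equal_find_neighbors_with_the_same_labels := by
  intro neighbors labels _ hpre
  unfold Spec_find_neighbors_with_the_same_labels
  unfold find_neighbors_with_the_same_labels
  rw [a_canonical neighbors labels hpre, b_canonical neighbors labels hpre]
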